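-- pv_equiv track=rewrite | github.com/prakhar394/AI_AC4a_Fall2023 | PeaceTextScraper.py | remove_unwanted_sections
-- ===== SOURCE A (Python) =====
-- def remove_unwanted_sections(text):
--     unwanted_sections = ['acknowledgments', 'references', 'author contributions']
--     lines = text.split('\n')
--     filtered_lines = []
--     collect = True
--     for line in lines:
--         if any(section in line.lower() for section in unwanted_sections):
--             collect = False
--         elif line.strip() == '':
--             collect = True
--         if collect:
--             filtered_lines.append(line)
--     return '\n'.join(filtered_lines)
-- ===== SOURCE B (Python) =====
-- def remove_unwanted_sections(text):
--     # Run-based pass: blank lines (strip()=='') are kept verbatim; each maximal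
--     # non-blank run is truncated at its first line containing an unwanted keyword.
--     unwanted_sections = ['acknowledgments', 'references', 'author contributions']
--     lines = text.split('\n')
--     kept = []
--     i = 0
--     n = len(lines)
--     while i < n:
--         if lines[i].strip() == '':
--             kept.append(lines[i])
--             i += 1
--         else:
--             j = i
--             while j < n and lines[j].strip() != '':
--                 j += 1
--             for line in lines[i:j]:
--                 if any(s in line.lower() for s in unwanted_sections):
--                     break
--                 kept.append(line)
--             i = j
--     return '\n'.join(kept)
-- ===== Notes on version B (the rewrite author's own statement) =====
-- stated objective: alternative
-- what changed: Replaces A's collect-flag toggle loop by a run-based pass: blank lines are kept verbatim and each maximal non-blank run is truncated at its first keyword line (inner scan per run instead of a carried boolean state).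
import Mathlib
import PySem

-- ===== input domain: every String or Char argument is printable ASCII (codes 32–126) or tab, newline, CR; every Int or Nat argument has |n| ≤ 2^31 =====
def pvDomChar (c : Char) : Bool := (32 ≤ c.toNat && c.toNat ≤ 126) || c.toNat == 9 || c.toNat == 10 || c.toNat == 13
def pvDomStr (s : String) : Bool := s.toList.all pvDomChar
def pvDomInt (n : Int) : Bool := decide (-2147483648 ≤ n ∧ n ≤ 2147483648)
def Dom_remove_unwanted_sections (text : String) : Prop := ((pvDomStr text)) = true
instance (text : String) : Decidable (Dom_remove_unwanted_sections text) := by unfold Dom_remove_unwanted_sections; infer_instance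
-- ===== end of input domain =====

-- B replaces A's collect-flag toggle loop by a run-based pass (blank lines kept verbatim,
-- each maximal non-blank run truncated at its first keyword line); same cost, different decomposition.

-- ===== PORT A =====
-- the three unwanted keywords, as char lists (shared constant of both Pythons)
def pvUnwanted : List (List Char) :=
  ["acknowledgments".toList, "references".toList, "author contributions".toList]

def remove_unwanted_sections (text : String) : String :=
  let lines := PySem.Chars.splitOn text.toList ['\n']
  let res := lines.foldl (fun (st : List (List Char) × Bool) line =>
      let collect :=
        if pvUnwanted.any (fun s => PySem.Chars.isIn s (PySem.Chars.lower line)) then false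
        else if PySem.Chars.strip line = [] then true
        else st.2
      (if collect then st.1 ++ [line] else st.1, collect)) ([], true)
  String.ofList (PySem.Chars.join ['\n'] res.1)

-- ===== PORT B =====
def pvIsBlank (line : List Char) : Bool := PySem.Chars.strip line = []

def pvHasKw (line : List Char) : Bool :=
  pvUnwanted.any (fun s => PySem.Chars.isIn s (PySem.Chars.lower line))

-- run-based scan: blank lines kept; a non-blank run is its longest keyword-free prefix
def pvRuns : List (List Char) → List (List Char)
  | [] => []
  | l :: ls =>
    if pvIsBlank l then l :: pvRuns ls
    else
      ((l :: ls).takeWhile (fun x => !pvIsBlank x)).takeWhile (fun x => !pvHasKw x)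
        ++ pvRuns ((l :: ls).dropWhile (fun x => !pvIsBlank x))
  termination_by ls => ls.length
  decreasing_by
    all_goals simp only [List.dropWhile, List.length_cons]
    · omega
    · rename_i h
      simp only [h, Bool.not_false]
      exact Nat.lt_succ_of_le (List.length_dropWhile_le _ _)

def remove_unwanted_sections_alt (text : String) : String :=
  String.ofList (PySem.Chars.join ['\n'] (pvRuns (PySem.Chars.splitOn text.toList ['\n'])))

-- ===== PRECONDITION & SPEC =====
def Spec_remove_unwanted_sections (text : String) (out : String) : Prop := out = remove_unwanted_sections_alt text
instance (text : String) (out : String) : Decidable (Spec_remove_unwanted_sections text out) := by unfold Spec_remove_unwanted_sections; infer_instance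

-- ===== CLAIM (what is proved, stated in full; the proofs are below) =====
def Claim_equal_remove_unwanted_sections : Prop := ∀ (text : String), Dom_remove_unwanted_sections text → Spec_remove_unwanted_sections text (remove_unwanted_sections text)

-- ===== LEMMAS AND PROOFS =====



-- a whitespace-only char is unchanged by lower() and is not 'a' or 'r'
lemma space_lower (c : Char) (h : PySem.Chars.isspace c = true) : PySem.Chars.lowerChar c = c := by
  unfold PySem.Chars.lowerChar
  rw [if_neg]
  intro hu
  unfold PySem.Chars.isupper at hu
  unfold PySem.Chars.isspace at h
  simp only [Bool.and_eq_true, decide_eq_true_eq, Char.le_def, UInt32.le_iff_toNat_le,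
    Bool.or_eq_true] at hu h
  have h1 : c.toNat = c.val.toNat := rfl
  have h2 : ('A').val.toNat = 65 := by decide
  have h3 : ('Z').val.toNat = 90 := by decide
  omega

lemma space_not_ar (c : Char) (h : PySem.Chars.isspace c = true) :
    PySem.Chars.lowerChar c ≠ 'a' ∧ PySem.Chars.lowerChar c ≠ 'r' := by
  rw [space_lower c h]
  unfold PySem.Chars.isspace at h
  simp only [Bool.or_eq_true, Bool.and_eq_true, decide_eq_true_eq] at h
  constructor <;> intro he <;> subst he <;> revert h <;> decide

lemma strip_nil_all_space (l : List Char) (h : PySem.Chars.strip l = []) :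
    ∀ c ∈ l, PySem.Chars.isspace c = true := by
  unfold PySem.Chars.strip PySem.Chars.rstrip PySem.Chars.lstrip at h
  rw [List.reverse_eq_nil_iff, List.dropWhile_eq_nil_iff] at h
  intro c hc
  rcases (List.mem_append.1
      (by rw [List.takeWhile_append_dropWhile (p := PySem.Chars.isspace)]; exact hc)) with h1 | h1
  · exact List.mem_takeWhile_imp h1
  · exact h c (List.mem_reverse.2 h1)

-- a whitespace-only line contains no keyword
lemma blank_no_kw (l : List Char) (h : pvIsBlank l = true) : pvHasKw l = false := by
  have hb : PySem.Chars.strip l = [] := by simpa [pvIsBlank] using h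
  have hall := strip_nil_all_space l hb
  simp only [pvHasKw, Bool.eq_false_iff, Ne, List.any_eq_true, not_exists, not_and]
  intro s hs
  rw [PySem.Chars.isIn_iff_infix]
  intro hinf
  simp only [pvUnwanted, List.mem_cons, List.not_mem_nil, or_false] at hs
  have key : ∃ a, (a = 'a' ∨ a = 'r') ∧ a ∈ PySem.Chars.lower l := by
    rcases hs with rfl | rfl | rfl
    · exact ⟨'a', Or.inl rfl, hinf.subset (by decide)⟩
    · exact ⟨'r', Or.inr rfl, hinf.subset (by decide)⟩
    · exact ⟨'a', Or.inl rfl, hinf.subset (by decide)⟩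
  obtain ⟨a, ha, hmem⟩ := key
  simp only [PySem.Chars.lower, List.mem_map] at hmem
  obtain ⟨c, hcl, hceq⟩ := hmem
  have := space_not_ar c (hall c hcl)
  rcases ha with rfl | rfl
  · exact this.1 hceq
  · exact this.2 hceq

-- pvRuns distributes over a non-blank, keyword-free head
lemma pvRuns_cons_plain (l : List Char) (ls : List (List Char))
    (hb : pvIsBlank l = false) (hk : pvHasKw l = false) :
    pvRuns (l :: ls) = l :: pvRuns ls := by
  rw [pvRuns, if_neg (by simp [hb])]
  simp only [List.takeWhile_cons, hb, hk, Bool.not_false, if_pos, List.dropWhile_cons]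
  rw [List.cons_append]
  congr 1
  cases ls with
  | nil => simp [pvRuns]
  | cons m ms =>
    by_cases hm : pvIsBlank m = true
    · simp [hm]
    · conv_rhs => rw [pvRuns]
      rw [if_neg (by simp [hm])]


-- A's loop body, named for the proofs (definitionally the lambda of the port)
def pvStepA (st : List (List Char) × Bool) (line : List Char) : List (List Char) × Bool :=
  let collect :=
    if pvUnwanted.any (fun s => PySem.Chars.isIn s (PySem.Chars.lower line)) then false
    else if PySem.Chars.strip line = [] then true
    else st.2
  (if collect then st.1 ++ [line] else st.1, collect)

lemma stepA_kw (st : List (List Char) × Bool) (l : List Char) (hk : pvHasKw l = true) :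
    pvStepA st l = (st.1, false) := by
  unfold pvHasKw at hk
  simp [pvStepA, hk]

lemma stepA_blank (st : List (List Char) × Bool) (l : List Char) (hk : pvHasKw l = false)
    (hb : pvIsBlank l = true) : pvStepA st l = (st.1 ++ [l], true) := by
  unfold pvHasKw at hk
  have hb' : PySem.Chars.strip l = [] := by simpa [pvIsBlank] using hb
  simp [pvStepA, hk, hb']

lemma stepA_plain (st : List (List Char) × Bool) (l : List Char) (hk : pvHasKw l = false)
    (hb : pvIsBlank l = false) :
    pvStepA st l = (if st.2 then st.1 ++ [l] else st.1, st.2) := by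
  unfold pvHasKw at hk
  have hb' : ¬ PySem.Chars.strip l = [] := by simpa [pvIsBlank] using hb
  simp [pvStepA, hk, hb']

-- the main invariant: A's fold from state (acc, collect) computes acc ++ pvRuns (…)
lemma fold_eq (n : Nat) : ∀ (lines : List (List Char)), lines.length ≤ n →
    (∀ acc, (lines.foldl pvStepA (acc, true)).1 = acc ++ pvRuns lines)
    ∧
    (∀ acc, (lines.foldl pvStepA (acc, false)).1
        = acc ++ pvRuns (lines.dropWhile (fun x => !pvIsBlank x))) := by
  induction n with
  | zero =>
    intro lines hlen
    have : lines = [] := List.eq_nil_of_length_eq_zero (Nat.le_zero.1 hlen)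
    subst this
    exact ⟨fun acc => by simp [pvRuns], fun acc => by simp [pvRuns]⟩
  | succ n ih =>
    intro lines hlen
    cases lines with
    | nil => exact ⟨fun acc => by simp [pvRuns], fun acc => by simp [pvRuns]⟩
    | cons l ls =>
      have hlen' : ls.length ≤ n := by simp at hlen; omega
      constructor
      · intro acc
        rcases Bool.eq_false_or_eq_true (pvHasKw l) with hk | hk
        · -- keyword line: dropped, collect := false
          have hb : pvIsBlank l = false := by
            rcases Bool.eq_false_or_eq_true (pvIsBlank l) with h | h
            · rw [blank_no_kw l h] at hk; exact absurd hk (by simp)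
            · exact h
          rw [List.foldl_cons, stepA_kw _ _ hk, (ih ls hlen').2 acc]
          rw [pvRuns, if_neg (by simp [hb])]
          simp [hb, hk]
        · rcases Bool.eq_false_or_eq_true (pvIsBlank l) with hb | hb
          · -- blank line: kept, collect := true
            rw [List.foldl_cons, stepA_blank _ _ hk hb, (ih ls hlen').1 (acc ++ [l])]
            rw [pvRuns, if_pos hb]
            simp
          · -- non-blank, no keyword: kept, collect stays true
            rw [List.foldl_cons, stepA_plain _ _ hk hb]
            simp only [if_pos]
            rw [(ih ls hlen').1 (acc ++ [l]), pvRuns_cons_plain l ls hb hk]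
            simp
      · intro acc
        rcases Bool.eq_false_or_eq_true (pvIsBlank l) with hb | hb
        · -- blank line: kept, back to collect mode
          have hk := blank_no_kw l hb
          rw [List.foldl_cons, stepA_blank _ _ hk hb, (ih ls hlen').1 (acc ++ [l])]
          rw [List.dropWhile_cons, if_neg (by simp [hb])]
          rw [pvRuns, if_pos hb]
          simp
        · -- non-blank line in skip mode: dropped, collect stays false (keyword or not)
          have hstep : pvStepA (acc, false) l = (acc, false) := by
            rcases Bool.eq_false_or_eq_true (pvHasKw l) with hk | hk
            · rw [stepA_kw _ _ hk]
            · rw [stepA_plain _ _ hk hb]; simp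
          rw [List.foldl_cons, hstep, (ih ls hlen').2 acc]
          simp [hb]

-- ===== VERDICT (by name: the statement is the Claim_ definition above) =====
theorem remove_unwanted_sections_spec : Claim_equal_remove_unwanted_sections := by
  intro text _
  unfold Spec_remove_unwanted_sections remove_unwanted_sections remove_unwanted_sections_alt
  have h := (fold_eq (PySem.Chars.splitOn text.toList ['\n']).length
      (PySem.Chars.splitOn text.toList ['\n']) le_rfl).1 []
  show String.ofList (PySem.Chars.join ['\n']
      ((PySem.Chars.splitOn text.toList ['\n']).foldl pvStepA ([], true)).1) = _
  rw [h, List.nil_append]
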